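-- pv_equiv track=rewrite | github.com/zzarbttoo/TMT | CH/20200702_2_k.py | solution
-- ===== SOURCE A (Python) =====
-- def solution(p):
--     u=''
--     if len(p)==0:                       #빈 문자열이면 그대로 반환
--         return p
--     for i in p :                        #p에 있는거 그대로 u에 계속 넣어줌
--         u=u+i
--         if u.count('(')==u.count(')'):  #(의 개수와 )의 개수가 같아지면 그만
--             break
--     v=p[len(u):]                        #v = p에서u를 뺸 나머지
--     if u[0]=='(' and u[-1]==')':        #u가 (로 시작해서 )로 끝나면(올바른)
--         answer=u+solution(v)            #v를 solution함수에 넣고 결과를 u에 붙힘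
--         return answer
--     else :                              #u가 '균형잡힌' 이면
--         u=u[1:-1]                       #앞뒤를 짜름
--         k=len(u)                        #u의 길이를 고정시키기위해 상수화
--         for j in range(k):              #u의 요소를 뒤집어서 붙여준다.
--             if u[j]=='(':
--                 u+=')'
--             else:
--                 u+='('
--         u=u[k:]                         #뒤집어진것만 선택해준다.
--         answer='('+ solution(v)+')'+u   #v는 재귀처리하고 나머지 붙여준다.
--     return answer
-- ===== SOURCE B (Python) =====
-- def solution(p):
--     out = []
--     tail = []
--     i = 0
--     n = len(p)
--     while i < n:
--         # find end of the shortest non-empty prefix with equal '(' / ')' counts,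
--         # using a running balance counter (whole rest if it never balances)
--         bal = 0
--         j = i
--         while j < n:
--             c = p[j]
--             bal += (c == '(') - (c == ')')
--             j += 1
--             if bal == 0:
--                 break
--         u = p[i:j]
--         if u[0] == '(' and u[-1] == ')':
--             out.append(u)
--         else:
--             out.append('(')
--             tail.append(')' + ''.join(')' if c == '(' else '(' for c in u[1:-1]))
--         i = j
--     return ''.join(out) + ''.join(reversed(tail))
-- ===== Notes on version B (the rewrite author's own statement) =====
-- stated objective: faster
-- what changed: B is iterative: one outer loop walks the string by index with an inner running-balance counter to find each split point (no recounting of both paren kinds over the growing prefix and no tail-slice copy per recursion level), collecting output pieces in a list plus a reversed-tail stack joined once at the end; the flip step is a map/join over the slice instead of an indexed append-then-drop loop.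
import Mathlib
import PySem

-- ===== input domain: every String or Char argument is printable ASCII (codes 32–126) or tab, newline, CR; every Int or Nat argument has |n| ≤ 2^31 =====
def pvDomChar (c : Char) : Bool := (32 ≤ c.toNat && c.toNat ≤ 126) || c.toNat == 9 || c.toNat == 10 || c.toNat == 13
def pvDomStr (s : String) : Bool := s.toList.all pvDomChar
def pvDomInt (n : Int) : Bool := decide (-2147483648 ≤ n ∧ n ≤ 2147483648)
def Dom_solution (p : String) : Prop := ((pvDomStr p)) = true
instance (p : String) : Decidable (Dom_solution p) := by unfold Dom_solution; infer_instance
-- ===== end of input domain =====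

-- B replaces A's per-character full recount of '(' / ')' by one running balance counter
-- and the indexed flip loop by a map over the slice.

-- ===== PORT A =====
-- A's first loop: append characters of p to u until u.count('(') == u.count(')')
-- (List.count on a single char is exactly Python str.count of a 1-char substring).
def solA_buildU : List Char → List Char → List Char
  | [], u => u
  | c :: rest, u =>
      let u' := u ++ [c]
      if u'.count '(' = u'.count ')' then u' else solA_buildU rest u'

-- termination fact the port cites in decreasing_by
theorem solA_buildU_length_lt : ∀ (l u : List Char), l ≠ [] → u.length < (solA_buildU l u).length := by
  intro l
  induction l with
  | nil => intro u h; exact absurd rfl h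
  | cons c rest ih =>
    intro u _
    simp only [solA_buildU]
    split
    · simp
    · rcases rest with _ | ⟨d, rest'⟩
      · simp [solA_buildU]
      · have := ih (u ++ [c]) (by simp)
        simp at this
        omega

-- literal transliteration of A on the character list
def solA (l : List Char) : List Char :=
  if hl : l = [] then l
  else
    let u := solA_buildU l []
    let v := l.drop u.length
    if PySem.List.pyGet? u 0 = some '(' ∧ PySem.List.pyGet? u (-1) = some ')' then
      u ++ solA v                                        -- u + solution(v)
    else
      let u1 := PySem.List.slice u (some 1) (some (-1))  -- u = u[1:-1]
      let k := u1.length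
      -- for j in range(k): u += ')' if u[j]=='(' else '('   (u[j] with 0 ≤ j < len(u): getD is exact)
      let u2 := (List.range k).foldl
        (fun acc j => acc ++ [if acc.getD j ' ' = '(' then ')' else '(']) u1
      let u3 := u2.drop k                                -- u = u[k:]
      ['('] ++ solA v ++ [')'] ++ u3
termination_by l.length
decreasing_by
  all_goals
    have h1 := solA_buildU_length_lt l [] hl
    simp at h1
    have h2 := List.length_pos_of_ne_nil hl
    simp [List.length_drop]
    omega

def solution (p : String) : String := String.mk (solA p.toList)

-- ===== PORT B =====
-- B's inner while loop: running balance counter, returns the length of the shortest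
-- non-empty balanced prefix (j - i), or the full remaining length if it never balances.
def solB_scan : List Char → Int → Nat → Nat
  | [], _, n => n
  | c :: rest, bal, n =>
      let bal' := bal + (if c = '(' then 1 else 0) - (if c = ')' then 1 else 0)
      if bal' = 0 then n + 1 else solB_scan rest bal' (n + 1)

theorem solB_scan_shift : ∀ (l : List Char) (bal : Int) (n : Nat),
    solB_scan l bal n = solB_scan l bal 0 + n := by
  intro l
  induction l with
  | nil => intro bal n; simp [solB_scan]
  | cons c rest ih =>
    intro bal n
    by_cases hb : bal + (if c = '(' then (1:Int) else 0) - (if c = ')' then 1 else 0) = 0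
    · simp only [solB_scan]
      rw [if_pos hb, if_pos hb]
      omega
    · simp only [solB_scan]
      rw [if_neg hb, if_neg hb, ih _ (n + 1), ih _ (0 + 1)]
      omega

-- termination fact the port cites in decreasing_by
theorem solB_scan_pos : ∀ (l : List Char) (bal : Int) (n : Nat), l ≠ [] → n < solB_scan l bal n := by
  intro l bal n hl
  rw [solB_scan_shift]
  rcases l with _ | ⟨c, rest⟩
  · exact absurd rfl hl
  · by_cases hb : bal + (if c = '(' then (1:Int) else 0) - (if c = ')' then 1 else 0) = 0
    · simp [solB_scan, hb]
    · simp only [solB_scan]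
      rw [if_neg hb, solB_scan_shift]
      omega

-- B's outer while loop: the remaining input (l = p[i:]), the 'out' parts so far,
-- and the 'tail' stack of pieces joined in reverse at the end.
def solB_go (l : List Char) (out tail : List (List Char)) : List Char :=
  if hl : l = [] then out.flatten ++ tail.reverse.flatten      -- ''.join(out) + ''.join(reversed(tail))
  else
    let m := solB_scan l 0 0
    let u := l.take m
    let rest := l.drop m
    if PySem.List.pyGet? u 0 = some '(' ∧ PySem.List.pyGet? u (-1) = some ')' then
      solB_go rest (out ++ [u]) tail
    else
      solB_go rest (out ++ [['(']])
        (tail ++ [[')'] ++ (PySem.List.slice u (some 1) (some (-1))).map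
                              (fun c => if c = '(' then ')' else '(')])
termination_by l.length
decreasing_by
  all_goals
    have h1 := solB_scan_pos l 0 0 hl
    have h2 := List.length_pos_of_ne_nil hl
    simp [List.length_drop]
    omega

def solB (l : List Char) : List Char := solB_go l [] []

def solution_alt (p : String) : String := String.mk (solB p.toList)

-- ===== PRECONDITION & SPEC =====
def Spec_solution (p : String) (out : String) : Prop := out = solution_alt p
instance (p : String) (out : String) : Decidable (Spec_solution p out) := by unfold Spec_solution; infer_instance

-- ===== CLAIM (what is proved, stated in full; the proofs are below) =====
def Claim_equal_solution : Prop := ∀ (p : String), Dom_solution p → Spec_solution p (solution p)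

-- ===== LEMMAS AND PROOFS =====

theorem solB_scan_le : ∀ (l : List Char) (bal : Int), solB_scan l bal 0 ≤ l.length := by
  intro l
  induction l with
  | nil => intro bal; simp [solB_scan]
  | cons c rest ih =>
    intro bal
    by_cases hb : bal + (if c = '(' then (1:Int) else 0) - (if c = ')' then 1 else 0) = 0
    · simp [solB_scan, hb]
    · simp only [solB_scan]
      rw [if_neg hb, solB_scan_shift]
      have := ih (bal + (if c = '(' then (1:Int) else 0) - (if c = ')' then 1 else 0))
      simp
      omega

-- A's break prefix is exactly the take of B's scan result.
theorem buildU_eq_take : ∀ (l u0 : List Char),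
    solA_buildU l u0
      = u0 ++ l.take (solB_scan l ((u0.count '(' : Int) - (u0.count ')' : Int)) 0) := by
  intro l
  induction l with
  | nil => intro u0; simp [solA_buildU, solB_scan]
  | cons c rest ih =>
    intro u0
    simp only [solA_buildU, solB_scan]
    have hbal : ((u0 ++ [c]).count '(' : Int) - ((u0 ++ [c]).count ')' : Int)
        = (u0.count '(' : Int) - (u0.count ')' : Int)
          + (if c = '(' then 1 else 0) - (if c = ')' then 1 else 0) := by
      simp [List.count_append, List.count_singleton]
      by_cases h1 : c = '(' <;> by_cases h2 : c = ')' <;> simp [h1, h2] at * <;> omega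
    have hcond : ((u0 ++ [c]).count '(' = (u0 ++ [c]).count ')')
        ↔ ((u0.count '(' : Int) - (u0.count ')' : Int)
            + (if c = '(' then 1 else 0) - (if c = ')' then 1 else 0) = 0) := by
      rw [← hbal]
      constructor
      · intro h; omega
      · intro h; omega
    by_cases hb : (u0 ++ [c]).count '(' = (u0 ++ [c]).count ')'
    · rw [if_pos hb, if_pos (hcond.mp hb)]
      simp
    · rw [if_neg hb, if_neg (fun h => hb (hcond.mpr h))]
      rw [ih (u0 ++ [c]), hbal]
      have hsc : solB_scan rest
            ((u0.count '(' : Int) - (u0.count ')' : Int)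
              + (if c = '(' then 1 else 0) - (if c = ')' then 1 else 0)) (0 + 1)
          = solB_scan rest
            ((u0.count '(' : Int) - (u0.count ')' : Int)
              + (if c = '(' then 1 else 0) - (if c = ')' then 1 else 0)) 0 + 1 := by
        rw [solB_scan_shift]
      rw [hsc]
      simp [List.take_succ_cons]

-- A's indexed flip loop, after dropping the original prefix, is B's map.
theorem flipLoop_prefix : ∀ (u1 : List Char) (k : Nat), k ≤ u1.length →
    (List.range k).foldl (fun acc j => acc ++ [if acc.getD j ' ' = '(' then ')' else '(']) u1
      = u1 ++ (u1.take k).map (fun c => if c = '(' then ')' else '(') := by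
  intro u1 k
  induction k with
  | zero => intro _; simp
  | succ k ih =>
    intro hk
    rw [List.range_succ, List.foldl_append, ih (by omega)]
    have hklt : k < u1.length := by omega
    simp only [List.foldl_cons, List.foldl_nil, List.map_take, List.getD]
    simp only [List.getElem?_append_left hklt, List.getElem?_eq_getElem hklt, Option.getD_some]
    rw [List.take_add_one, List.getElem?_map, List.getElem?_eq_getElem hklt]
    simp

theorem flipLoop_eq_map (u1 : List Char) :
    ((List.range u1.length).foldl
        (fun acc j => acc ++ [if acc.getD j ' ' = '(' then ')' else '(']) u1).drop u1.length
      = u1.map (fun c => if c = '(' then ')' else '(') := by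
  rw [flipLoop_prefix u1 u1.length le_rfl]
  simp

theorem solB_go_eq : ∀ (N : Nat) (l : List Char), l.length ≤ N → ∀ (out tail : List (List Char)),
    solB_go l out tail = out.flatten ++ solA l ++ tail.reverse.flatten := by
  intro N
  induction N with
  | zero =>
    intro l hl out tail
    have : l = [] := List.eq_nil_of_length_eq_zero (by omega)
    subst this
    simp [solB_go, solA]
  | succ N ih =>
    intro l hl out tail
    by_cases hnil : l = []
    · subst hnil; simp [solB_go, solA]
    · rw [solB_go, solA, dif_neg hnil, dif_neg hnil]
      have hu : solA_buildU l [] = l.take (solB_scan l 0 0) := by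
        have := buildU_eq_take l []
        simpa using this
      have hle : solB_scan l 0 0 ≤ l.length := solB_scan_le l 0
      have hpos : 0 < solB_scan l 0 0 := solB_scan_pos l 0 0 hnil
      have htl : (l.take (solB_scan l 0 0)).length = solB_scan l 0 0 := by
        rw [List.length_take]; omega
      have hlp := List.length_pos_of_ne_nil hnil
      have hvlen : (l.drop (solB_scan l 0 0)).length ≤ N := by
        simp [List.length_drop]; omega
      simp only [hu, htl, flipLoop_eq_map]
      by_cases hc : PySem.List.pyGet? (l.take (solB_scan l 0 0)) 0 = some '(' ∧
          PySem.List.pyGet? (l.take (solB_scan l 0 0)) (-1) = some ')'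
      · rw [if_pos hc, if_pos hc, ih _ hvlen]
        simp [List.flatten_append, List.append_assoc]
      · rw [if_neg hc, if_neg hc, ih _ hvlen]
        simp [List.flatten_append, List.reverse_append, List.append_assoc]

theorem solA_eq_solB : ∀ (l : List Char), solA l = solB l := by
  intro l
  rw [solB, solB_go_eq l.length l le_rfl]
  simp

-- ===== VERDICT (by name: the statement is the Claim_ definition above) =====
theorem solution_spec : Claim_equal_solution := by
  intro p _
  unfold Spec_solution solution solution_alt
  rw [solA_eq_solB]
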